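-- pv_equiv track=rewrite | github.com/callahantiff/PheKnowLator | pkt_kg/utils/data_utils.py | sublist_creator
-- ===== SOURCE A (Python) =====
-- import heapq
-- from typing import Dict, Generator, List, Optional, Union
--
-- def sublist_creator(actors: Union[Dict, List], chunk_size: int) -> List:
--     """Takes a list of lists and returns sublists, where the sublists are balanced according to their length.
--
--     SOURCE: https://stackoverflow.com/questions/61648065
--
--     Args:
--         actors: A list or a dictionary keyed by edge identifier with the length of each associated edge list
--             stored as the values.
--         chunk_size: An integer specifying the number of sublists that should be returned.
--
--     Returns:
--          updated_lists: A list of lists, where the inner lists have been balanced by their size.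
--     """
--
--     if isinstance(actors, Dict): values = sorted(list(actors.values()), reverse=True)
--     else: values = sorted(actors, reverse=True)
--     lists: List = [[] for _ in range(chunk_size)]; totals = [(0, i) for i in range(chunk_size)]; heapq.heapify(totals)
--     for value in values:
--         total, index = heapq.heappop(totals); lists[index].append(value); heapq.heappush(totals, (total + value, index))
--
--     # update list to return string identifier associated with each list length
--     if isinstance(actors, Dict):
--         updated_lists = []; used_ids = set()
--         for sub in lists:
--             sub_list = [[k for k, v in actors.items() if v == x and k not in used_ids][0] for x in sub]
--             updated_lists += [sub_list]; used_ids |= set(x for y in sub_list for x in y)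
--     else: updated_lists = lists
--
--     return updated_lists
-- ===== SOURCE B (Python) =====
-- def _build(lo, hi):
--     """Tournament tree over bins [lo, hi): a tuple (min_load, argmin_bin, left, right)."""
--     if lo + 1 == hi:
--         return (0, lo, None, None)
--     mid = (lo + hi) // 2
--     l = _build(lo, mid)
--     r = _build(mid, hi)
--     return (l[0], l[1], l, r) if l[0] <= r[0] else (r[0], r[1], l, r)
--
--
-- def _add(t, lo, hi, j, v):
--     """Return t with v added to bin j's load (path rebuild, ties keep the left bin)."""
--     mn, am, l, r = t
--     if l is None:
--         return (mn + v, am, None, None)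
--     mid = (lo + hi) // 2
--     if j < mid:
--         l = _add(l, lo, mid, j, v)
--     else:
--         r = _add(r, mid, hi, j, v)
--     return (l[0], l[1], l, r) if l[0] <= r[0] else (r[0], r[1], l, r)
--
--
-- def sublist_creator(actors, chunk_size):
--     """Balance values into chunk_size sublists: greedy over descending values, each value
--     goes to the currently lightest sublist (lowest index on ties).  Instead of a heap of
--     (total, index) tuples, a tournament tree reports the leftmost lightest bin; the
--     (bin, value) assignment sequence is recorded and bucketed into the output at the end.
--     For a dict, the balanced values are mapped back to keys via a value->keys index built
--     once, instead of rescanning actors.items() for every single value."""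
--     is_dict = isinstance(actors, dict)
--     values = sorted(actors.values() if is_dict else actors, reverse=True)
--     n = max(chunk_size, 0)
--     m = min(n, len(values))  # greedy with leftmost ties never touches bin >= len(values)
--     assign = []
--     if values:
--         tree = _build(0, m)
--         for v in values:
--             j = tree[1]
--             assign.append((j, v))
--             tree = _add(tree, 0, m, j, v)
--     buckets = [[] for _ in range(n)]
--     for j, v in assign:
--         buckets[j].append(v)
--     if not is_dict:
--         return buckets
--     by_value = {}
--     for k, v in actors.items():
--         by_value.setdefault(v, []).append(k)
--     updated_lists = []
--     used_ids = set()
--     for sub in buckets: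
--         sub_list = [[k for k in by_value.get(x, []) if k not in used_ids][0] for x in sub]
--         updated_lists.append(sub_list)
--         used_ids |= set(x for y in sub_list for x in y)
--     return updated_lists
-- ===== Notes on version B (the rewrite author's own statement) =====
-- stated objective: alternative
-- what changed: B replaces A's heap of (total, index) tuples by a tournament tree whose root always names the leftmost lightest bin, records the (bin, value) assignment sequence and buckets it in one final pass; in the dict branch B maps balanced values back to keys through a value->keys index built once instead of rescanning actors.items() for every value.
-- outside the precondition, e.g. on sublist_creator([1], 0): A raises IndexError, B raises RecursionError
import Mathlib
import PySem

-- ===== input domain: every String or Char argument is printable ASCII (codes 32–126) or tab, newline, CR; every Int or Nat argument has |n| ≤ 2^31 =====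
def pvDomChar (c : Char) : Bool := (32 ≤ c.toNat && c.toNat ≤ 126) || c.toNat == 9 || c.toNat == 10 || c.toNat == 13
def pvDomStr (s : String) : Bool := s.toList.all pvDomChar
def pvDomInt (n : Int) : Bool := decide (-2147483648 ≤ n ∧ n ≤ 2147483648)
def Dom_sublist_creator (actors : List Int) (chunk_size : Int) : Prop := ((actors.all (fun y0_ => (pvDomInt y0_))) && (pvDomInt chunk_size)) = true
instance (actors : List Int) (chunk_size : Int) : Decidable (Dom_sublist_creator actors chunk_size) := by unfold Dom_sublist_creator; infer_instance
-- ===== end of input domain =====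

-- B replaces A's heap of (total, index) tuples by a tournament tree reporting the leftmost
-- lightest bin, recording the assignment sequence and bucketing it into the output at the
-- end; the Python B also handles A's dict branch via a value->keys index (objective:
-- alternative; return value only).


-- ===== PORT A =====
-- Python tuple comparison (total, index) is lexicographic.
def pvLexLt (a b : Int × Int) : Bool := a.1 < b.1 || (a.1 == b.1 && a.2 < b.2)

-- heapq.heappop: removes and returns the smallest element in tuple order.  The heap's
-- internal layout is unobservable in A (the list `totals` is touched only through
-- heapify/heappop/heappush), so the heap is ported by its documented contract:
-- pop the (here unique, since indices are pairwise distinct) minimum; push appends.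
def pvPopMin : List (Int × Int) → Option ((Int × Int) × List (Int × Int))
  | [] => none   -- heappop of an empty heap: IndexError (excluded by Pre_)
  | x :: xs =>
    let m := xs.foldl (fun m y => if pvLexLt y m then y else m) x
    some (m, (x :: xs).erase m)

-- for value in values: total, index = heappop(totals); lists[index].append(value);
--                      heappush(totals, (total + value, index))
def pvLoopA : List Int → List (List Int) → List (Int × Int) → List (List Int)
  | [], lists, _ => lists
  | v :: vs, lists, totals =>
    match pvPopMin totals with
    | none => lists   -- Python raises IndexError here (excluded by Pre_)
    | some ((total, index), rest) =>
        -- index is a heap index: always 0 ≤ index < len(lists) on reachable states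
        pvLoopA vs (lists.modify index.toNat (· ++ [v])) (rest ++ [(total + v, index)])

-- actors : List Int is the list branch of A; the dict branch is outside this signature.
def sublist_creator (actors : List Int) (chunk_size : Int) : List (List Int) :=
  let values := PySem.List.sorted actors (fun x => x) true
  let lists := (PySem.List.pyRange 0 chunk_size 1).map (fun _ => ([] : List Int))
  let totals := (PySem.List.pyRange 0 chunk_size 1).map (fun i => ((0 : Int), i))
  pvLoopA values lists totals

-- ===== PORT B =====
-- Source B's tuple (min_load, argmin_bin, left, right); left = right = None is a leaf.
inductive PvTree where
  | leaf : Int → Int → PvTree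
  | node : Int → Int → PvTree → PvTree → PvTree
deriving Repr, DecidableEq

def pvMin : PvTree → Int
  | .leaf mn _ => mn
  | .node mn _ _ _ => mn

def pvArg : PvTree → Int
  | .leaf _ am => am
  | .node _ am _ _ => am

-- Source B's "(l[0], l[1], l, r) if l[0] <= r[0] else (r[0], r[1], l, r)"
def pvCombine (l r : PvTree) : PvTree :=
  if pvMin l ≤ pvMin r then .node (pvMin l) (pvArg l) l r else .node (pvMin r) (pvArg r) l r

theorem pvBuild_mid_lt {lo hi : Int} (h : lo + 1 < hi) :
    (PySem.Int.floordiv (lo + hi) 2 - lo).toNat < (hi - lo).toNat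
      ∧ (hi - PySem.Int.floordiv (lo + hi) 2).toNat < (hi - lo).toNat := by
  have h1 : lo + 1 ≤ PySem.Int.floordiv (lo + hi) 2 :=
    (PySem.Int.le_floordiv_iff_mul_le (by norm_num)).2 (by omega)
  have h2 : PySem.Int.floordiv (lo + hi) 2 < hi :=
    (PySem.Int.floordiv_lt_iff_lt_mul (by norm_num)).2 (by omega)
  omega

def pvBuild (lo hi : Int) : PvTree :=
  if lo + 1 = hi then .leaf 0 lo
  else if h : lo + 1 < hi then
    pvCombine (pvBuild lo (PySem.Int.floordiv (lo + hi) 2))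
              (pvBuild (PySem.Int.floordiv (lo + hi) 2) hi)
  else .leaf 0 lo   -- hi ≤ lo: Python's _build hits RecursionError; region excluded by Pre_
termination_by (hi - lo).toNat
decreasing_by
  · exact (pvBuild_mid_lt h).1
  · exact (pvBuild_mid_lt h).2

def pvAdd (t : PvTree) (lo hi j v : Int) : PvTree :=
  match t with
  | .leaf mn am => .leaf (mn + v) am
  | .node _ _ l r =>
    if j < PySem.Int.floordiv (lo + hi) 2 then
      pvCombine (pvAdd l lo (PySem.Int.floordiv (lo + hi) 2) j v) r
    else
      pvCombine l (pvAdd r (PySem.Int.floordiv (lo + hi) 2) hi j v)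

-- for v in values: j = tree[1]; assign.append((j, v)); tree = _add(tree, 0, n, j, v)
def pvLoopB (n : Int) : List Int → PvTree → List (Int × Int) → List (Int × Int)
  | [], _, assign => assign
  | v :: vs, tree, assign =>
      pvLoopB n vs (pvAdd tree 0 n (pvArg tree) v) (assign ++ [(pvArg tree, v)])

-- list branch of Source B (the dict branch is outside the List Int signature)
def sublist_creator_alt (actors : List Int) (chunk_size : Int) : List (List Int) :=
  let values := PySem.List.sorted actors (fun x => x) true
  let n : Int := max chunk_size 0
  -- m = min(n, len(values)): greedy with leftmost ties never touches bin >= len(values)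
  let m : Int := min n (values.length : Int)
  let assign := if values.isEmpty then ([] : List (Int × Int))
                else pvLoopB m values (pvBuild 0 m) []
  let buckets := (PySem.List.pyRange 0 n 1).map (fun _ => ([] : List Int))
  -- buckets[j].append(v): j is a bin index, always 0 ≤ j < n on reachable states
  assign.foldl (fun bs p => bs.modify p.1.toNat (· ++ [p.2])) buckets

-- ===== PRECONDITION & SPEC =====
-- A raises IndexError (heappop from an empty heap) when actors is nonempty and
-- chunk_size < 1; B raises there too (RecursionError while building the tree of no bins).
def Pre_sublist_creator (actors : List Int) (chunk_size : Int) : Prop :=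
  actors = [] ∨ 1 ≤ chunk_size
instance (actors : List Int) (chunk_size : Int) : Decidable (Pre_sublist_creator actors chunk_size) := by unfold Pre_sublist_creator; infer_instance

def pvWitness_sublist_creator : List Int × Int := ([5, 3, 3, 1, 2], 2)

def Spec_sublist_creator (actors : List Int) (chunk_size : Int) (out : List (List Int)) : Prop := out = sublist_creator_alt actors chunk_size
instance (actors : List Int) (chunk_size : Int) (out : List (List Int)) : Decidable (Spec_sublist_creator actors chunk_size out) := by unfold Spec_sublist_creator; infer_instance

-- ===== CLAIM (what is proved, stated in full; the proofs are below) =====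
def Claim_equal_sublist_creator : Prop := ∀ (actors : List Int) (chunk_size : Int), Dom_sublist_creator actors chunk_size → Pre_sublist_creator actors chunk_size → Spec_sublist_creator actors chunk_size (sublist_creator actors chunk_size)

-- ===== LEMMAS AND PROOFS =====

-- A's heap state as a function of the ghost load array: the (load, index) pair of every bin.
def pvPairs (loads : List Int) : List (Int × Int) :=
  (PySem.List.enumerate loads 0).map (fun p => (p.2, p.1))

-- B's final bucketing of an assignment sequence, starting from the given bins.
def pvFill (init : List (List Int)) (assign : List (Int × Int)) : List (List Int) :=
  assign.foldl (fun bs p => bs.modify p.1.toNat (· ++ [p.2])) init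

theorem pvFill_nil_init (assign : List (Int × Int)) : pvFill [] assign = [] := by
  induction assign with
  | nil => rfl
  | cons p ps ih => simpa [pvFill, List.modify_nil] using ih

theorem pvFill_snoc (init : List (List Int)) (assign : List (Int × Int)) (p : Int × Int) :
    pvFill init (assign ++ [p]) = (pvFill init assign).modify p.1.toNat (· ++ [p.2]) := by
  simp [pvFill, List.foldl_append]

-- the tournament tree over [lo, hi) represents the ghost load array: every inner node was
-- combined from the two halves split at (lo+hi)//2, every leaf holds its bin's load.
inductive PvRepr (loads : List Int) : PvTree → Int → Int → Prop where
  | leaf (lo : Int) (h0 : 0 ≤ lo) (hlt : lo.toNat < loads.length) :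
      PvRepr loads (.leaf (loads[lo.toNat]) lo) lo (lo + 1)
  | node (lo hi : Int) (l r : PvTree) (hlt : lo + 1 < hi)
      (hl : PvRepr loads l lo (PySem.Int.floordiv (lo + hi) 2))
      (hr : PvRepr loads r (PySem.Int.floordiv (lo + hi) 2) hi) :
      PvRepr loads (pvCombine l r) lo hi

-- the root of a represented tree names the leftmost minimum of its segment
theorem pvArg_node (mn am : Int) (l r : PvTree) : pvArg (.node mn am l r) = am := rfl
theorem pvMin_node (mn am : Int) (l r : PvTree) : pvMin (.node mn am l r) = mn := rfl
theorem pvArg_leaf (mn am : Int) : pvArg (.leaf mn am) = am := rfl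
theorem pvMin_leaf (mn am : Int) : pvMin (.leaf mn am) = mn := rfl

theorem pvRepr_spec (loads : List Int) (t : PvTree) (lo hi : Int)
    (h : PvRepr loads t lo hi) :
    0 ≤ lo ∧ lo ≤ pvArg t ∧ pvArg t < hi
      ∧ (∃ hb : (pvArg t).toNat < loads.length, pvMin t = loads[(pvArg t).toNat])
      ∧ (∀ i : Int, lo ≤ i → i < hi → ∀ hb : i.toNat < loads.length, pvMin t ≤ loads[i.toNat])
      ∧ (∀ i : Int, lo ≤ i → i < pvArg t → ∀ hb : i.toNat < loads.length, pvMin t < loads[i.toNat]) := by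
  induction h with
  | leaf lo h0 hlt =>
    refine ⟨h0, le_refl _, by rw [pvArg_leaf]; omega, ⟨hlt, rfl⟩, ?_, ?_⟩
    · intro i h1 h2 hb
      have hil : i = lo := by omega
      subst hil
      rw [pvMin_leaf]
    · intro i h1 h2 _
      rw [pvArg_leaf] at h2
      omega
  | node lo hi l r hlt hl hr ihl ihr =>
    obtain ⟨hl0, hlle, hllt, ⟨hlb, hlmin⟩, hlall, hlfirst⟩ := ihl
    obtain ⟨hr0, hrle, hrlt, ⟨hrb, hrmin⟩, hrall, hrfirst⟩ := ihr
    have hmidlo : lo + 1 ≤ PySem.Int.floordiv (lo + hi) 2 :=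
      (PySem.Int.le_floordiv_iff_mul_le (by norm_num)).2 (by omega)
    have hmidhi : PySem.Int.floordiv (lo + hi) 2 < hi :=
      (PySem.Int.floordiv_lt_iff_lt_mul (by norm_num)).2 (by omega)
    unfold pvCombine
    split
    · next hle =>
      simp only [pvArg_node, pvMin_node]
      refine ⟨hl0, hlle, by omega, ⟨hlb, hlmin⟩, ?_, ?_⟩
      · intro i h1 h2 hb
        by_cases hi2 : i < PySem.Int.floordiv (lo + hi) 2
        · exact hlall i h1 hi2 hb
        · exact le_trans hle (hrall i (by omega) h2 hb)
      · intro i h1 h2 hb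
        exact hlfirst i h1 h2 hb
    · next hle =>
      have hlr : pvMin r < pvMin l := lt_of_not_ge hle
      simp only [pvArg_node, pvMin_node]
      refine ⟨hl0, by omega, hrlt, ⟨hrb, hrmin⟩, ?_, ?_⟩
      · intro i h1 h2 hb
        by_cases hi2 : i < PySem.Int.floordiv (lo + hi) 2
        · exact le_trans hlr.le (hlall i h1 hi2 hb)
        · exact hrall i (by omega) h2 hb
      · intro i h1 h2 hb
        by_cases hi2 : i < PySem.Int.floordiv (lo + hi) 2
        · exact lt_of_lt_of_le hlr (hlall i h1 hi2 hb)
        · exact hrfirst i (by omega) h2 hb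

-- a represented tree only reads its own segment of the load array
theorem pvRepr_congr (loads loads' : List Int) (t : PvTree) (lo hi : Int)
    (h : PvRepr loads t lo hi) (hlen : loads'.length = loads.length)
    (hsame : ∀ i : Int, lo ≤ i → i < hi → loads'[i.toNat]? = loads[i.toNat]?) :
    PvRepr loads' t lo hi := by
  induction h with
  | leaf lo h0 hlt =>
    have hlt' : lo.toNat < loads'.length := by omega
    have he : loads'[lo.toNat] = loads[lo.toNat] := by
      have := hsame lo (le_refl _) (by omega)
      rw [List.getElem?_eq_getElem hlt', List.getElem?_eq_getElem hlt] at this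
      simpa using this
    rw [← he]
    exact PvRepr.leaf lo h0 hlt'
  | node lo hi l r hlt hl hr ihl ihr =>
    have hmidlo : lo + 1 ≤ PySem.Int.floordiv (lo + hi) 2 :=
      (PySem.Int.le_floordiv_iff_mul_le (by norm_num)).2 (by omega)
    have hmidhi : PySem.Int.floordiv (lo + hi) 2 < hi :=
      (PySem.Int.floordiv_lt_iff_lt_mul (by norm_num)).2 (by omega)
    exact PvRepr.node lo hi l r hlt
      (ihl (fun i h1 h2 => hsame i h1 (by omega)))
      (ihr (fun i h1 h2 => hsame i (by omega) h2))

-- _add(t, lo, hi, j, v) represents the load array with v added to bin j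
theorem pvRepr_add (loads : List Int) (t : PvTree) (lo hi j v : Int)
    (h : PvRepr loads t lo hi) (hj1 : lo ≤ j) (hj2 : j < hi) :
    PvRepr (loads.modify j.toNat (· + v)) (pvAdd t lo hi j v) lo hi := by
  induction h with
  | leaf lo h0 hlt =>
    have hj : j = lo := by omega
    subst hj
    have hlt' : j.toNat < (loads.modify j.toNat (· + v)).length := by
      simpa using hlt
    have he : (loads.modify j.toNat (· + v))[j.toNat]'hlt' = loads[j.toNat] + v := by
      simp
    have := PvRepr.leaf (loads := loads.modify j.toNat (· + v)) j h0 hlt'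
    rw [he] at this
    exact this
  | node lo hi l r hlt hl hr ihl ihr =>
    have hmidlo : lo + 1 ≤ PySem.Int.floordiv (lo + hi) 2 :=
      (PySem.Int.le_floordiv_iff_mul_le (by norm_num)).2 (by omega)
    have hmidhi : PySem.Int.floordiv (lo + hi) 2 < hi :=
      (PySem.Int.floordiv_lt_iff_lt_mul (by norm_num)).2 (by omega)
    have hl0 : 0 ≤ lo := (pvRepr_spec loads l lo _ hl).1
    obtain ⟨mn, am, hc⟩ : ∃ mn am, pvCombine l r = .node mn am l r := by
      unfold pvCombine; split
      · exact ⟨_, _, rfl⟩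
      · exact ⟨_, _, rfl⟩
    rw [hc]
    show PvRepr _ (pvAdd (.node mn am l r) lo hi j v) lo hi
    unfold pvAdd
    split
    · next hjm =>
      refine PvRepr.node lo hi _ r hlt (ihl hj1 hjm) ?_
      refine pvRepr_congr loads _ r _ _ hr (by simp) ?_
      intro i h1 h2
      rw [List.getElem?_modify]
      have : ¬ (j.toNat = i.toNat) := by omega
      simp [this]
    · next hjm =>
      rw [not_lt] at hjm
      refine PvRepr.node lo hi l _ hlt ?_ (ihr hjm hj2)
      refine pvRepr_congr loads _ l _ _ hl (by simp) ?_
      intro i h1 h2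
      rw [List.getElem?_modify]
      have : ¬ (j.toNat = i.toNat) := by omega
      simp [this]

-- _build(lo, hi) represents the all-zero load array
theorem pvRepr_build (N : Nat) : ∀ k : Nat, ∀ lo hi : Int, (hi - lo).toNat = k →
    0 ≤ lo → lo < hi → hi ≤ (N : Int) →
    PvRepr (List.replicate N (0 : Int)) (pvBuild lo hi) lo hi := by
  intro k
  induction k using Nat.strong_induction_on with
  | _ k ih =>
    intro lo hi hk h0 h1 h2
    rw [pvBuild]
    by_cases he : lo + 1 = hi
    · rw [if_pos he]
      have hlt : lo.toNat < (List.replicate N (0 : Int)).length := by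
        simp; omega
      have := PvRepr.leaf (loads := List.replicate N (0 : Int)) lo h0 hlt
      rw [List.getElem_replicate] at this
      rw [← he]
      exact this
    · rw [if_neg he]
      have hlt : lo + 1 < hi := by omega
      rw [dif_pos hlt]
      have hmidlo : lo + 1 ≤ PySem.Int.floordiv (lo + hi) 2 :=
        (PySem.Int.le_floordiv_iff_mul_le (by norm_num)).2 (by omega)
      have hmidhi : PySem.Int.floordiv (lo + hi) 2 < hi :=
        (PySem.Int.floordiv_lt_iff_lt_mul (by norm_num)).2 (by omega)
      exact PvRepr.node lo hi _ _ hlt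
        (ih _ (by omega) lo _ rfl h0 (by omega) (by omega))
        (ih _ (by omega) _ hi rfl (by omega) (by omega) h2)

-- the running-minimum foldl of pvPopMin splits its input around its result:
-- strictly larger elements before it, no smaller one after it.
theorem pvFoldMin_split {α : Type} (lt : α → α → Bool)
    (htrans : ∀ a b c, lt a b = true → lt b c = true → lt a c = true)
    (hmix : ∀ a b c, lt a b = true → lt c b = false → lt a c = true)
    (x : α) (xs : List α) :
    ∃ pre post, x :: xs = pre ++ (xs.foldl (fun m y => if lt y m then y else m) x) :: post
      ∧ (∀ y ∈ pre, lt (xs.foldl (fun m y => if lt y m then y else m) x) y = true)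
      ∧ (∀ y ∈ post, lt y (xs.foldl (fun m y => if lt y m then y else m) x) = false) := by
  induction xs generalizing x with
  | nil => exact ⟨[], [], rfl, by simp, by simp⟩
  | cons y ys ih =>
    simp only [List.foldl_cons]
    by_cases h : lt y x = true
    · rw [if_pos h]
      obtain ⟨pre, post, heq, hpre, hpost⟩ := ih y
      refine ⟨x :: pre, post, by rw [List.cons_append, ← heq], ?_, hpost⟩
      intro z hz
      rcases List.mem_cons.1 hz with rfl | hz
      · cases pre with
        | nil =>
          rw [List.nil_append] at heq
          injection heq with h1 _
          rw [← h1]; exact h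
        | cons p ps =>
          have h1 : p = y := by
            have := congrArg List.head? heq; simpa using this.symm
          subst h1
          exact htrans _ _ _ (hpre p (by simp)) h
      · exact hpre z hz
    · rw [if_neg h]
      rw [Bool.not_eq_true] at h
      obtain ⟨pre, post, heq, hpre, hpost⟩ := ih x
      cases pre with
      | nil =>
        rw [List.nil_append] at heq
        injection heq with h1 h2
        refine ⟨[], y :: post, ?_, by simp, ?_⟩
        · rw [List.nil_append, ← h1, h2]
        · intro z hz
          rcases List.mem_cons.1 hz with rfl | hz
          · rw [← h1]; exact h
          · exact hpost z hz
      | cons p ps =>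
        have h1 : p = x := by
          have := congrArg List.head? heq; simpa using this.symm
        subst h1
        have htl : ys = ps ++ (ys.foldl (fun m y => if lt y m then y else m) p) :: post := by
          have := congrArg List.tail heq; simpa using this
        refine ⟨p :: y :: ps, post, by rw [List.cons_append, List.cons_append, ← htl], ?_, hpost⟩
        intro z hz
        rcases List.mem_cons.1 hz with rfl | hz
        · exact hpre z (by simp)
        rcases List.mem_cons.1 hz with rfl | hz
        · exact hmix _ p _ (hpre p (by simp)) h
        · exact hpre z (by simp [hz])

theorem pvLexLt_trans (a b c : Int × Int) (h1 : pvLexLt a b = true) (h2 : pvLexLt b c = true) :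
    pvLexLt a c = true := by
  simp [pvLexLt] at *; omega

theorem pvLexLt_mix (a b c : Int × Int) (h1 : pvLexLt a b = true) (h2 : pvLexLt c b = false) :
    pvLexLt a c = true := by
  simp [pvLexLt] at *; omega

theorem pvLexLt_antisymm (a b : Int × Int) (h1 : pvLexLt a b = false) (h2 : pvLexLt b a = false) :
    a = b := by
  simp [pvLexLt] at *
  rw [Prod.ext_iff]
  omega

theorem pvPairs_decomp (loads : List Int) (f : Int → Int) (k : Nat) (hk : k < loads.length) :
    ∃ P Q, pvPairs loads = P ++ (loads[k], (k : Int)) :: Q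
      ∧ pvPairs (loads.modify k f) = P ++ (f loads[k], (k : Int)) :: Q
      ∧ ∀ y ∈ P, y.2 < (k : Int) := by
  refine ⟨pvPairs (loads.take k),
          (PySem.List.enumerate (loads.drop (k+1)) ((k:Int)+1)).map (fun p => (p.2, p.1)), ?_, ?_, ?_⟩
  · conv_lhs => rw [← List.take_append_drop k loads, List.drop_eq_getElem_cons hk]
    simp only [pvPairs, PySem.List.enumerate_append, PySem.List.enumerate_cons,
      List.map_append, List.map_cons, List.length_take, Nat.min_eq_left hk.le, zero_add]
  · rw [List.modify_eq_take_cons_drop hk]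
    simp only [pvPairs, PySem.List.enumerate_append, PySem.List.enumerate_cons,
      List.map_append, List.map_cons, List.length_take, Nat.min_eq_left hk.le, zero_add]
  · intro y hy
    simp only [pvPairs, List.mem_map] at hy
    obtain ⟨p, hp, rfl⟩ := hy
    rw [PySem.List.mem_enumerate_iff] at hp
    obtain ⟨k', hk', rfl⟩ := hp
    rw [List.length_take] at hk'
    simp only [zero_add]
    omega

theorem pvPairs_replicate (k : Nat) (s : Int) :
    (PySem.List.enumerate (List.replicate k (0:Int)) s).map (fun p => (p.2, p.1))
      = (PySem.List.pyRange s (s + k) 1).map (fun i => ((0:Int), i)) := by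
  induction k generalizing s with
  | zero => simp [PySem.List.pyRange_one_eq_nil]
  | succ m ih =>
    have h2 : s + ((m+1:Nat):Int) = (s+1) + (m:Int) := by push_cast; ring
    rw [List.replicate_succ, PySem.List.enumerate_cons, h2,
      PySem.List.pyRange_one_cons (by omega : s < s + 1 + (m:Int)),
      List.map_cons, List.map_cons, ih (s+1)]

-- the heap over all n bins and the tree over the first m bins agree: since ties go to the
-- leftmost bin, the touched bins always form a prefix of length t ≤ number of assigned
-- values, so with m = min(n, #values) no bin ≥ m is ever chosen by either side.
theorem pvLoop_eq (vs : List Int) (n m : Int) (loads : List Int) (totals : List (Int × Int))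
    (lists : List (List Int)) (assign : List (Int × Int)) (tree : PvTree) (t : Nat)
    (hlen : (loads.length : Int) = n)
    (hmn : m ≤ n)
    (hperm : totals.Perm (pvPairs loads))
    (hlists : lists = pvFill ((PySem.List.pyRange 0 n 1).map (fun _ => [])) assign)
    (hrepr : PvRepr loads tree 0 m ∨ (m ≤ 0 ∧ n ≤ 0))
    (ht : (t : Int) ≤ m)
    (hzero : ∀ i : Nat, t ≤ i → ∀ hb : i < loads.length, loads[i] = 0)
    (hcount : (t : Int) + vs.length ≤ m ∨ m = n) :
    pvLoopA vs lists totals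
      = pvFill ((PySem.List.pyRange 0 n 1).map (fun _ => [])) (pvLoopB m vs tree assign) := by
  induction vs generalizing loads totals lists assign tree t with
  | nil => simpa [pvLoopA, pvLoopB] using hlists
  | cons v vs ih =>
    rcases hrepr with hrepr | hn0
    · -- a real tree over [0, m)
      obtain ⟨_, hj0, hjm, ⟨hjb, hjmin⟩, hminP, hfirst⟩ := pvRepr_spec loads tree 0 m hrepr
      have hjn : pvArg tree < n := by omega
      -- the tree's minimum over [0, m) is a minimum over all n bins: bins ≥ m are
      -- untouched (load 0, since t ≤ m) and, when m < n, some bin < m has load ≤ 0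
      have hmin : ∀ i : Int, 0 ≤ i → i < n → ∀ hb : i.toNat < loads.length,
          pvMin tree ≤ loads[i.toNat] := by
        rcases hcount with hc | hc
        · -- t + (1 + |vs|) ≤ m: bin t < m is untouched, so pvMin ≤ loads[t] = 0
          have htm : (t : Int) < m := by
            simp only [List.length_cons] at hc; push_cast at hc; omega
          have htb : t < loads.length := by omega
          have hm0 : pvMin tree ≤ 0 := by
            have := hminP (t : Int) (by omega) htm (by simpa using htb)
            have h0 := hzero t le_rfl htb
            simp only [Int.toNat_natCast] at this
            omega
          intro i h1 h2 hb
          by_cases him : i < m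
          · exact hminP i h1 him hb
          · have : loads[i.toNat] = 0 := hzero i.toNat (by omega) hb
            omega
        · subst hc; exact hminP
      -- A's pop returns the unique lexicographic minimum of totals, which is
      -- (loads[pvArg tree], pvArg tree) for B's leftmost-lightest bin pvArg tree
      have htne : totals ≠ [] := by
        intro hnil
        have hle := hperm.length_eq
        rw [hnil] at hle
        simp [pvPairs, PySem.List.length_enumerate] at hle
        omega
      obtain ⟨tt, ts, rfl⟩ := List.exists_cons_of_ne_nil htne
      set mm : Int × Int := ts.foldl (fun m y => if pvLexLt y m then y else m) tt with hmdef
      obtain ⟨preA, postA, heqA, hpreA, hpostA⟩ :=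
        pvFoldMin_split pvLexLt pvLexLt_trans pvLexLt_mix tt ts
      rw [← hmdef] at heqA hpreA hpostA
      have hirrefl : ∀ a : Int × Int, pvLexLt a a = false := by
        intro a; simp [pvLexLt]
      have hm_notlt : ∀ y ∈ tt :: ts, pvLexLt y mm = false := by
        intro y hy
        rw [heqA] at hy
        rcases List.mem_append.1 hy with h | h
        · by_contra hc
          rw [Bool.not_eq_false] at hc
          have := pvLexLt_trans _ _ _ (hpreA y h) hc
          rw [hirrefl] at this
          exact Bool.false_ne_true this
        · rcases List.mem_cons.1 h with rfl | h
          · exact hirrefl mm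
          · exact hpostA y h
      set pstar : Int × Int := (loads[(pvArg tree).toNat]'hjb, pvArg tree) with hpstardef
      have hpstar_pairs : pstar ∈ pvPairs loads := by
        simp only [pvPairs, List.mem_map]
        refine ⟨(pvArg tree, loads[(pvArg tree).toNat]'hjb), ?_, rfl⟩
        rw [PySem.List.mem_enumerate_iff]
        exact ⟨(pvArg tree).toNat, hjb, by simp [Int.toNat_of_nonneg hj0]⟩
      have hpstar_tot : pstar ∈ tt :: ts := (hperm.mem_iff).2 hpstar_pairs
      have hm_tot : mm ∈ tt :: ts := by
        rw [heqA]; exact List.mem_append.2 (Or.inr (List.mem_cons_self))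
      have hm_pairs : mm ∈ pvPairs loads := (hperm.mem_iff).1 hm_tot
      obtain ⟨k', hk', hmk⟩ : ∃ k', ∃ h : k' < loads.length, mm = (loads[k'], (k' : Int)) := by
        simp only [pvPairs, List.mem_map] at hm_pairs
        obtain ⟨p, hp, hps⟩ := hm_pairs
        rw [PySem.List.mem_enumerate_iff] at hp
        obtain ⟨k', hk', rfl⟩ := hp
        exact ⟨k', hk', by rw [← hps]; simp⟩
      have hmp : mm = pstar := by
        apply pvLexLt_antisymm
        · -- ¬ mm < pstar : bin pvArg tree has minimal load, leftmost among the minimal ones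
          have h1 : pvMin tree ≤ loads[k'] := by
            have := hmin (k' : Int) (by omega) (by omega) (by simpa using hk')
            simpa using this
          rw [hjmin] at h1
          by_cases hkj : (k' : Int) < pvArg tree
          · have h2 : pvMin tree < loads[k'] := by
              have := hfirst (k' : Int) (by omega) hkj (by simpa using hk')
              simpa using this
            rw [hjmin] at h2
            simp [hmk, hpstardef, pvLexLt]
            omega
          · simp [hmk, hpstardef, pvLexLt]
            omega
        · exact hm_notlt pstar hpstar_tot
      -- take the step on both sides
      rw [pvLoopA]
      simp only [pvPopMin, ← hmdef, hmp]
      rw [pvLoopB]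
      -- new states satisfy the invariant
      obtain ⟨P, Q, hd1, hd2, hPsmall⟩ := pvPairs_decomp loads (· + v) (pvArg tree).toNat hjb
      rw [Int.toNat_of_nonneg hj0] at hd1 hd2
      have hnotP : pstar ∉ P := by
        intro hmem
        have := hPsmall pstar hmem
        rw [hpstardef] at this
        simp at this
        omega
      -- the chosen bin never lies beyond the untouched-prefix marker (when m < n)
      have hjt : (t : Int) + (1 + (vs.length : Int)) ≤ m → (pvArg tree).toNat ≤ t := by
        intro hc
        by_contra hgt
        push_neg at hgt
        have htb : t < loads.length := by omega
        have h1 := hfirst (t : Int) (by omega) (by omega) (by simpa using htb)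
        have h2 := hzero (pvArg tree).toNat (by omega) hjb
        have h3 := hzero t le_rfl htb
        simp only [Int.toNat_natCast] at h1
        omega
      apply ih (loads.modify (pvArg tree).toNat (· + v)) _ _ _ _
        (max t ((pvArg tree).toNat + 1))
      · simpa using hlen
      · -- permutation invariant for the new heap
        have e1 : ((tt :: ts).erase pstar).Perm ((pvPairs loads).erase pstar) :=
          hperm.erase pstar
        rw [hd1, List.erase_append_right _ hnotP, List.erase_cons_head] at e1
        have e2 := ((e1.append_right [(pstar.1 + v, pvArg tree)]).trans
          (List.perm_append_singleton _ _)).trans List.perm_middle.symm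
        rw [hd2]
        simpa [hpstardef] using e2
      · rw [pvFill_snoc, hlists]
      · exact Or.inl (pvRepr_add loads tree 0 m (pvArg tree) v hrepr hj0 hjm)
      · -- new marker still within [0, m]
        push_cast
        omega
      · -- all bins from the new marker on are still untouched
        intro i hi hb
        have hb' : i < loads.length := by simpa using hb
        have hne : ¬ ((pvArg tree).toNat = i) := by omega
        have h9 : (loads.modify (pvArg tree).toNat (· + v))[i]? = loads[i]? := by
          rw [List.getElem?_modify]; simp [hne]
        have h8 := hzero i (by omega) hb'
        rw [List.getElem?_eq_getElem hb, List.getElem?_eq_getElem hb'] at h9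
        simp only [Option.some_inj] at h9
        rw [h9, h8]
      · -- marker + remaining values still fit in [0, m), unless m = n
        rcases hcount with hc | hc
        · left
          simp only [List.length_cons] at hc
          push_cast at hc
          have := hjt (by omega)
          push_cast
          omega
        · right; exact hc
    · -- n ≤ 0: no bins, so both sides are the empty bucket list
      have hload : loads = [] := by
        have : loads.length = 0 := by omega
        exact List.eq_nil_of_length_eq_zero this
      have htot : totals = [] := by
        subst hload
        simpa [pvPairs, PySem.List.enumerate] using hperm.eq_nil
      subst htot
      rw [pvLoopA]
      simp only [pvPopMin]
      rw [hlists, PySem.List.pyRange_one_eq_nil hn0.2]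
      simp [pvFill_nil_init]

-- ===== VERDICT (by name: the statement is the Claim_ definition above) =====
theorem sublist_creator_spec : Claim_equal_sublist_creator := by
  intro actors chunk_size _ _
  show sublist_creator actors chunk_size = sublist_creator_alt actors chunk_size
  simp only [sublist_creator, sublist_creator_alt]
  have hrange : PySem.List.pyRange 0 chunk_size 1 = PySem.List.pyRange 0 (max chunk_size 0) 1 := by
    rcases le_or_gt chunk_size 0 with h | h
    · rw [PySem.List.pyRange_one_eq_nil h, PySem.List.pyRange_one_eq_nil (by omega)]
    · rw [max_eq_left h.le]
  by_cases hv : (PySem.List.sorted actors (fun x => x) true).isEmpty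
  · rw [List.isEmpty_iff] at hv
    rw [hv, if_pos (by simp)]
    show ((PySem.List.pyRange 0 chunk_size 1).map _) = pvFill _ []
    rw [hrange]; rfl
  · rw [if_neg (by simp [hv])]
    rw [hrange]
    set values := PySem.List.sorted actors (fun x => x) true with hvals
    set n : Int := max chunk_size 0 with hn
    set m : Int := min n (values.length : Int) with hm
    have hn0 : 0 ≤ n := le_max_right _ _
    have hv1 : 1 ≤ (values.length : Int) := by
      rw [List.isEmpty_iff] at hv
      have : values ≠ [] := hv
      have := List.length_pos_of_ne_nil this
      omega
    apply pvLoop_eq values n m (List.replicate n.toNat 0) _ _ _ _ 0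
    · simp [Int.toNat_of_nonneg hn0]
    · exact min_le_left _ _
    · have := pvPairs_replicate n.toNat 0
      rw [zero_add, Int.toNat_of_nonneg hn0] at this
      rw [show pvPairs (List.replicate n.toNat 0)
            = (PySem.List.pyRange 0 n 1).map (fun i => ((0:Int), i)) from this]
    · rfl
    · rcases le_or_gt m 0 with h | h
      · refine Or.inr ⟨h, ?_⟩
        by_contra hc
        push_neg at hc
        have : 1 ≤ m := le_min (by omega) hv1
        omega
      · refine Or.inl ?_
        have := pvRepr_build n.toNat (m - 0).toNat 0 m rfl (le_refl 0) h
          (by rw [Int.toNat_of_nonneg hn0]; exact min_le_left _ _)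
        exact this
    · exact le_min (by omega) (by omega)
    · intro i _ hb
      simp
    · rcases le_total n (values.length : Int) with h | h
      · right; rw [hm, min_eq_left h]
      · left; rw [hm, min_eq_right h]; simp
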